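-- pv_equiv track=rewrite | github.com/smudger007/advent2020 | day6/custom_forms.py | scanFormsPartTwo
-- ===== SOURCE A (Python) =====
-- def scanFormsPartTwo(formsIn):
--     count = 0
--     for group in formsIn:
--         holdSet = set()
--         for form in group.split("\n"):
--             toRemove = []
--             if len(holdSet) == 0:
--                 [holdSet.add(char) for char in form]
--             else:
--                 for char in holdSet:
--                     if char not in form: toRemove.append(char)
--                 for char in toRemove: holdSet.remove(char)
--                 if len(holdSet) == 0: break
--         count = count + len(holdSet)
--     return(count)
-- ===== SOURCE B (Python) =====
-- def scanFormsPartTwo(formsIn):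
--     total = 0
--     for group in formsIn:
--         first, *rest = group.split("\n")
--         total += sum(1 for c in set(first) if all(c in f for f in rest))
--     return total
-- ===== Notes on version B (the rewrite author's own statement) =====
-- stated objective: simpler
-- what changed: A maintains a mutable intersection set it shrinks form by form (collecting a toRemove list, re-seeding whenever the set is empty, breaking early); B directly counts the distinct characters of the group's first form that appear in every other form, with no mutated set.
-- intended difference: On groups whose split starts with an empty form yet whose later forms still share a common character, A's empty-set re-seeding silently skips the leading empty forms and returns their common-character count, while B returns 0 for such a group, which is the intended value since a blank answer form answers no questions and so the group's common set is empty. — e.g. on scanFormsPartTwo(["\nab"]): A returns 2, B returns 0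
import Mathlib
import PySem

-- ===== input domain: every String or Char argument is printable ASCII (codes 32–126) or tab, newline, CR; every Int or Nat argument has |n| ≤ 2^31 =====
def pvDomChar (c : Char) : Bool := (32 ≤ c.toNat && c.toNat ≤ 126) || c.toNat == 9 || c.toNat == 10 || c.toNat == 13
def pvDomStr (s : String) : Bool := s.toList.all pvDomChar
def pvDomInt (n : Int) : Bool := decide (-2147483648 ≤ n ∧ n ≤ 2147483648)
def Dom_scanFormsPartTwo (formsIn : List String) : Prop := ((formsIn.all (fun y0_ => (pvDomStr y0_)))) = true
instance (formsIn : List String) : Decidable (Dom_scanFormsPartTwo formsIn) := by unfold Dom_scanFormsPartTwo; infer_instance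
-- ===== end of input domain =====

-- ===== PORT A =====
-- B replaces A's mutable shrink-the-set-per-form loop with a direct per-character membership count; objective: simpler.
-- Inner loop of A: state = holdSet; the break on an emptied set returns immediately.
def pvAInner : List String → PySem.Set Char → PySem.Set Char
  | [], s => s
  | form :: rest, s =>
    if PySem.Set.len s = 0 then
      pvAInner rest (form.toList.foldl PySem.Set.add s)
    else
      let toRemove := s.filter (fun c => !(form.toList.contains c))
      let s' := toRemove.foldl (fun t c => PySem.Set.discard t c) s
      if PySem.Set.len s' = 0 then s' else pvAInner rest s'

def scanFormsPartTwo (formsIn : List String) : Int :=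
  formsIn.foldl
    (fun count group =>
      count + PySem.Set.len (pvAInner ((PySem.Str.split? group "\n").getD []) PySem.Set.empty))
    0

-- ===== PORT B =====
-- 'first, *rest = group.split("\n")': split always yields at least one piece, so the [] branch is unreachable.
-- 'c in f' on a single character is exactly membership of that character.
def scanFormsPartTwo_alt (formsIn : List String) : Int :=
  formsIn.foldl
    (fun total group =>
      match (PySem.Str.split? group "\n").getD [] with
      | [] => total
      | first :: rest =>
          total +
            ((PySem.Set.ofList first.toList).countP
              (fun c => rest.all (fun f => f.toList.contains c)) : Int))
    0

-- ===== PRECONDITION & SPEC =====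
-- 'while fs and fs[0] == ""' (used only to STATE the difference region, not by either port)
def pvDropEmpty : List String → List String
  | [] => []
  | f :: rest => if f == "" then pvDropEmpty rest else f :: rest

-- On groups whose split starts with an empty form yet whose later forms still share a common character,
-- A skips the leading empty forms and returns their common-character count; B returns 0 there, the intended
-- value since a blank form answers no questions, so the group's common set is empty.
def pvGroupDiff (g : String) : Bool :=
  let fs := (PySem.Str.split? g "\n").getD []
  (fs.head? == some "") &&
    (match pvDropEmpty fs with
     | [] => false
     | f :: r => f.toList.any (fun c => r.all (fun s => s.toList.contains c)))

def D_scanFormsPartTwo (formsIn : List String) : Prop :=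
  ∃ g ∈ formsIn, pvGroupDiff g = true
instance (formsIn : List String) : Decidable (D_scanFormsPartTwo formsIn) := by
  unfold D_scanFormsPartTwo; infer_instance

def Spec_scanFormsPartTwo (formsIn : List String) (out : Int) : Prop :=
  ¬ D_scanFormsPartTwo formsIn → out = scanFormsPartTwo_alt formsIn
instance (formsIn : List String) (out : Int) : Decidable (Spec_scanFormsPartTwo formsIn out) := by unfold Spec_scanFormsPartTwo; infer_instance

def pvDiffWitness_scanFormsPartTwo : List String := ["\nab"]
def pvDiffWitnessOut_scanFormsPartTwo : Int × Int := (2, 0)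

-- ===== CLAIM =====
def Claim_unchanged_scanFormsPartTwo : Prop := ∀ (formsIn : List String), Dom_scanFormsPartTwo formsIn → Spec_scanFormsPartTwo formsIn (scanFormsPartTwo formsIn)
def Claim_changed_scanFormsPartTwo : Prop := Dom_scanFormsPartTwo (pvDiffWitness_scanFormsPartTwo) ∧ D_scanFormsPartTwo (pvDiffWitness_scanFormsPartTwo) ∧ scanFormsPartTwo (pvDiffWitness_scanFormsPartTwo) = pvDiffWitnessOut_scanFormsPartTwo.1 ∧ scanFormsPartTwo_alt (pvDiffWitness_scanFormsPartTwo) = pvDiffWitnessOut_scanFormsPartTwo.2 ∧ pvDiffWitnessOut_scanFormsPartTwo.1 ≠ pvDiffWitnessOut_scanFormsPartTwo.2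
def Claim_exact_scanFormsPartTwo : Prop := ∀ (formsIn : List String), Dom_scanFormsPartTwo formsIn → D_scanFormsPartTwo formsIn → scanFormsPartTwo formsIn ≠ scanFormsPartTwo_alt formsIn

-- ===== LEMMAS AND PROOFS =====

-- per-group contributions of the two ports
def pvAG (g : String) : Int :=
  PySem.Set.len (pvAInner ((PySem.Str.split? g "\n").getD []) PySem.Set.empty)

def pvBG (g : String) : Int :=
  match (PySem.Str.split? g "\n").getD [] with
  | [] => 0
  | first :: rest =>
      ((PySem.Set.ofList first.toList).countP
        (fun c => rest.all (fun f => f.toList.contains c)) : Int)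

lemma foldl_discard_eq_filter_not_contains (r s : List Char) :
    r.foldl (fun t c => PySem.Set.discard t c) s = s.filter (fun c => !(r.contains c)) := by
  induction r generalizing s with
  | nil => simp
  | cons x r ih =>
    rw [List.foldl_cons, ih]
    simp only [PySem.Set.discard, List.filter_filter]
    apply List.filter_congr
    intro c _
    simp only [List.contains_cons, Bool.not_or, Bool.beq_comm]
    exact Bool.and_comm _ _

-- the two-phase removal (collect toRemove, then remove each) keeps exactly the chars of the form
lemma removal_pass (form : String) (s : List Char) :
    (s.filter (fun c => !(form.toList.contains c))).foldl (fun t c => PySem.Set.discard t c) s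
      = s.filter (fun c => form.toList.contains c) := by
  rw [foldl_discard_eq_filter_not_contains]
  apply List.filter_congr
  intro c hc
  by_cases h : form.toList.contains c
  · simp [List.mem_filter, hc]
  · simp [List.mem_filter, hc]

-- once the set is nonempty, A's loop (with its break) computes the chars present in every remaining form
lemma pvAInner_nonempty (rest : List String) (s : List Char) (hs : s ≠ []) :
    pvAInner rest s = s.filter (fun c => rest.all (fun f => f.toList.contains c)) := by
  induction rest generalizing s with
  | nil => simp [pvAInner]
  | cons f rest ih =>
    have hlen : ¬ (PySem.Set.len s = 0) := by
      simpa [PySem.Set.len, List.length_eq_zero_iff] using hs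
    rw [pvAInner, if_neg hlen]
    simp only [removal_pass]
    have hr : s.filter (fun c => (f :: rest).all (fun g => g.toList.contains c))
        = (s.filter (fun c => f.toList.contains c)).filter
            (fun c => rest.all (fun g => g.toList.contains c)) := by
      rw [List.filter_filter]
      apply List.filter_congr
      intro c _
      simp only [List.all_cons]
      exact Bool.and_comm _ _
    by_cases h0 : s.filter (fun c => f.toList.contains c) = []
    · have : PySem.Set.len (s.filter (fun c => f.toList.contains c)) = 0 := by
        rw [h0]; simp [PySem.Set.len]
      rw [if_pos this, hr, h0]
      simp
    · have : ¬ PySem.Set.len (s.filter (fun c => f.toList.contains c)) = 0 := by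
        simpa [PySem.Set.len, List.length_eq_zero_iff] using h0
      rw [if_neg this, ih _ h0, hr]

-- A's empty-set re-seeding skips exactly the leading empty forms
lemma pvAInner_empty_start (fs : List String) :
    pvAInner fs PySem.Set.empty =
      (match pvDropEmpty fs with
       | [] => ([] : List Char)
       | first :: rest => (PySem.Set.ofList first.toList).filter
           (fun c => rest.all (fun f => f.toList.contains c))) := by
  induction fs with
  | nil => simp [pvAInner, pvDropEmpty, PySem.Set.empty]
  | cons f rest ih =>
    rw [pvAInner]
    have h0 : PySem.Set.len (PySem.Set.empty : PySem.Set Char) = 0 := by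
      simp [PySem.Set.len, PySem.Set.empty]
    rw [if_pos h0]
    have hfold : f.toList.foldl PySem.Set.add PySem.Set.empty = PySem.Set.ofList f.toList := rfl
    rw [hfold]
    by_cases hf : f = ""
    · subst hf
      simpa [pvDropEmpty, PySem.Set.ofList, PySem.Set.empty] using ih
    · have hne : f.toList ≠ [] := by
        intro h
        exact hf (String.toList_eq_nil_iff.mp h)
      have hset : PySem.Set.ofList f.toList ≠ [] := by
        intro h
        obtain ⟨c, cs, hc⟩ := List.exists_cons_of_ne_nil hne
        have : c ∈ PySem.Set.ofList f.toList := by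
          rw [PySem.Set.mem_ofList, hc]; exact List.mem_cons_self
        rw [h] at this
        exact List.not_mem_nil this
      rw [pvAInner_nonempty _ _ hset]
      simp [pvDropEmpty, hf]

lemma pvAG_eq (g : String) :
    pvAG g =
      (match pvDropEmpty ((PySem.Str.split? g "\n").getD []) with
       | [] => (0 : Int)
       | first :: rest =>
           ((PySem.Set.ofList first.toList).countP
             (fun c => rest.all (fun f => f.toList.contains c)) : Int)) := by
  unfold pvAG
  rw [pvAInner_empty_start]
  cases h : pvDropEmpty ((PySem.Str.split? g "\n").getD []) with
  | nil => simp [PySem.Set.len]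
  | cons first rest => simp [PySem.Set.len, List.countP_eq_length_filter]

lemma countP_pos_of_any {l : List Char} {p : Char → Bool} (h : l.any p = true) :
    0 < ((PySem.Set.ofList l).countP p : Int) := by
  obtain ⟨c, hc, hpc⟩ := List.any_eq_true.mp h
  have hmem : c ∈ PySem.Set.ofList l := (PySem.Set.mem_ofList _ _).mpr hc
  have : 0 < (PySem.Set.ofList l).countP p := by
    rw [List.countP_pos_iff]
    exact ⟨c, hmem, hpc⟩
  exact_mod_cast this

lemma countP_zero_of_not_any {l : List Char} {p : Char → Bool} (h : l.any p = false) :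
    ((PySem.Set.ofList l).countP p : Int) = 0 := by
  have : (PySem.Set.ofList l).countP p = 0 := by
    rw [List.countP_eq_zero]
    intro c hc
    have hcl : c ∈ l := (PySem.Set.mem_ofList _ _).mp hc
    intro hpc
    have := List.any_eq_true.mpr ⟨c, hcl, hpc⟩
    rw [h] at this
    exact Bool.false_ne_true this
  exact_mod_cast this

-- the three per-group comparisons
lemma pvAG_eq_pvBG (g : String) (h : pvGroupDiff g = false) : pvAG g = pvBG g := by
  rw [pvAG_eq]
  unfold pvBG
  unfold pvGroupDiff at h
  cases hfs : (PySem.Str.split? g "\n").getD [] with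
  | nil => simp [pvDropEmpty]
  | cons first rest =>
    by_cases hf : first = ""
    · subst hf
      rw [hfs] at h
      simp only [List.head?_cons, beq_self_eq_true, Bool.true_and] at h
      have hde : pvDropEmpty ("" :: rest) = pvDropEmpty rest := by simp [pvDropEmpty]
      rw [hde]
      rw [hde] at h
      cases hdr : pvDropEmpty rest with
      | nil => simp
      | cons f r =>
        rw [hdr] at h
        simp only [String.toList_empty, PySem.Set.ofList, List.foldl_nil]
        exact (countP_zero_of_not_any h).symm ▸ (countP_zero_of_not_any h)
    · have hde : pvDropEmpty (first :: rest) = first :: rest := by simp [pvDropEmpty, hf]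
      rw [hde]

lemma pvBG_lt_pvAG (g : String) (h : pvGroupDiff g = true) : pvBG g < pvAG g := by
  rw [pvAG_eq]
  unfold pvBG
  unfold pvGroupDiff at h
  cases hfs : (PySem.Str.split? g "\n").getD [] with
  | nil => rw [hfs] at h; simp [pvDropEmpty] at h
  | cons first rest =>
    rw [hfs] at h
    simp only [List.head?_cons, Bool.and_eq_true, beq_iff_eq, Option.some.injEq] at h
    obtain ⟨hf, hany⟩ := h
    subst hf
    have hde : pvDropEmpty ("" :: rest) = pvDropEmpty rest := by simp [pvDropEmpty]
    rw [hde]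
    rw [hde] at hany
    cases hdr : pvDropEmpty rest with
    | nil => rw [hdr] at hany; simp at hany
    | cons f r =>
      rw [hdr] at hany
      simp only [String.toList_empty, PySem.Set.ofList, List.foldl_nil]
      exact_mod_cast countP_pos_of_any hany

lemma pvBG_le_pvAG (g : String) : pvBG g ≤ pvAG g := by
  cases h : pvGroupDiff g with
  | false => exact le_of_eq (pvAG_eq_pvBG g h).symm
  | true => exact le_of_lt (pvBG_lt_pvAG g h)

-- the ports as sums of per-group contributions
lemma scanA_foldl (l : List String) (acc : Int) :
    l.foldl
      (fun count group =>
        count + PySem.Set.len (pvAInner ((PySem.Str.split? group "\n").getD []) PySem.Set.empty)) acc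
      = acc + (l.map pvAG).sum := by
  induction l generalizing acc with
  | nil => simp
  | cons g l ih =>
    rw [List.foldl_cons, ih]
    simp [pvAG]
    ring

lemma scanA_eq_sum (l : List String) : scanFormsPartTwo l = (l.map pvAG).sum := by
  unfold scanFormsPartTwo
  rw [scanA_foldl]
  ring

lemma scanB_foldl (l : List String) (acc : Int) :
    l.foldl
      (fun total group =>
        match (PySem.Str.split? group "\n").getD [] with
        | [] => total
        | first :: rest =>
            total +
              ((PySem.Set.ofList first.toList).countP
                (fun c => rest.all (fun f => f.toList.contains c)) : Int)) acc
      = acc + (l.map pvBG).sum := by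
  induction l generalizing acc with
  | nil => simp
  | cons g l ih =>
    rw [List.foldl_cons]
    have hbody : ∀ (t : Int),
        (match (PySem.Str.split? g "\n").getD [] with
         | [] => t
         | first :: rest =>
             t + ((PySem.Set.ofList first.toList).countP
                   (fun c => rest.all (fun f => f.toList.contains c)) : Int))
          = t + pvBG g := by
      intro t
      unfold pvBG
      cases (PySem.Str.split? g "\n").getD [] with
      | nil => simp
      | cons first rest => rfl
    rw [hbody, ih]
    simp
    ring

lemma scanB_eq_sum (l : List String) : scanFormsPartTwo_alt l = (l.map pvBG).sum := by
  unfold scanFormsPartTwo_alt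
  rw [scanB_foldl]
  ring

lemma sum_le_sum (l : List String) : (l.map pvBG).sum ≤ (l.map pvAG).sum := by
  induction l with
  | nil => exact le_refl _
  | cons g l ih =>
    simp only [List.map_cons, List.sum_cons]
    exact add_le_add (pvBG_le_pvAG g) ih

lemma sum_lt_sum (l : List String) (h : ∃ g ∈ l, pvGroupDiff g = true) :
    (l.map pvBG).sum < (l.map pvAG).sum := by
  induction l with
  | nil => simp at h
  | cons g l ih =>
    simp only [List.map_cons, List.sum_cons]
    rcases h with ⟨x, hx, hdx⟩
    rcases List.mem_cons.mp hx with rfl | hxl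
    · exact add_lt_add_of_lt_of_le (pvBG_lt_pvAG x hdx) (sum_le_sum l)
    · exact add_lt_add_of_le_of_lt (pvBG_le_pvAG g) (ih ⟨x, hxl, hdx⟩)

-- ===== VERDICT =====
theorem scanFormsPartTwo_spec : Claim_unchanged_scanFormsPartTwo := by
  intro formsIn _ hnd
  unfold D_scanFormsPartTwo at hnd
  push Not at hnd
  rw [scanA_eq_sum, scanB_eq_sum]
  congr 1
  apply List.map_congr_left
  intro g hg
  have : pvGroupDiff g = false := by
    cases h : pvGroupDiff g with
    | false => rfl
    | true => exact absurd h (hnd g hg)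
  exact pvAG_eq_pvBG g this

theorem scanFormsPartTwo_changed : Claim_changed_scanFormsPartTwo := by
  unfold Claim_changed_scanFormsPartTwo; decide

theorem scanFormsPartTwo_tight : Claim_exact_scanFormsPartTwo := by
  intro formsIn _ hd
  unfold D_scanFormsPartTwo at hd
  rw [scanA_eq_sum, scanB_eq_sum]
  exact ne_of_gt (sum_lt_sum formsIn hd)
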